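-- pv_equiv track=rewrite | github.com/LuShan123888/Video-Captions | src/service/youtube.py | _select_lang
-- ===== SOURCE A (Python) =====
-- from typing import Dict, Any, Optional, List
--
-- YOUTUBE_LANG_PRIORITY = [
--     "zh-Hans-en", "zh-Hant-en", "zh-Hans", "zh-Hant", "zh-CN", "zh-TW", "zh-HK", "zh", "en"
-- ]
--
-- def _select_lang(available: List[str]) -> Optional[str]:
--     for lang in YOUTUBE_LANG_PRIORITY:
--         if lang in available:
--             return lang
--     for lang in available:
--         if lang.startswith('zh'):
--             return lang
--     return available[0] if available else None
-- ===== SOURCE B (Python) =====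
-- from typing import Optional, List
--
-- YOUTUBE_LANG_PRIORITY = [
--     "zh-Hans-en", "zh-Hant-en", "zh-Hans", "zh-Hant", "zh-CN", "zh-TW", "zh-HK", "zh", "en"
-- ]
--
-- def _select_lang(available: List[str]) -> Optional[str]:
--     rank = {lang: i for i, lang in enumerate(YOUTUBE_LANG_PRIORITY)}
--     best_rank = None   # minimal priority index seen among elements of available
--     first_zh = None    # first element starting with 'zh'
--     first = None       # first element overall
--     for lang in available:
--         if first is None:
--             first = lang
--         r = rank.get(lang)
--         if r is not None and (best_rank is None or r < best_rank):
--             best_rank = r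
--         if first_zh is None and lang.startswith('zh'):
--             first_zh = lang
--     if best_rank is not None:
--         return YOUTUBE_LANG_PRIORITY[best_rank]
--     if first_zh is not None:
--         return first_zh
--     return first
-- ===== Notes on version B (the rewrite author's own statement) =====
-- stated objective: alternative
-- what changed: A makes up to 9 sequential membership scans over `available` followed by a second zh-prefix scan; B builds a priority->index dict once and makes a single pass over `available` tracking (minimal priority index, first zh-prefixed element, first element), then picks by tier.
import Mathlib
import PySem

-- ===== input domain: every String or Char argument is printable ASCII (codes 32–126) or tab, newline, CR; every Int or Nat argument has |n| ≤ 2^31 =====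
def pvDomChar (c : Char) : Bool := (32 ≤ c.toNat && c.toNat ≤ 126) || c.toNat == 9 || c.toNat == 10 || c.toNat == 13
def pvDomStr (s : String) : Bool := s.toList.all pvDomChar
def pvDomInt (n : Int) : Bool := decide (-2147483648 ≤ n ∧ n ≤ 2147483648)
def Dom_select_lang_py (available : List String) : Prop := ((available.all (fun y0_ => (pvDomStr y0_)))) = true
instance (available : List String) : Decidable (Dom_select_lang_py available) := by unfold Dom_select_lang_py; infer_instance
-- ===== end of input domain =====

-- B replaces A's two sequential scans (9 membership tests over `available`, then a zh-prefix scan)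
-- by one single pass over `available` with a rank dict and three accumulators (objective: alternative).

-- ===== PORT A =====
def pvPriority : List String :=
  ["zh-Hans-en", "zh-Hant-en", "zh-Hans", "zh-Hant", "zh-CN", "zh-TW", "zh-HK", "zh", "en"]

def select_lang_py (available : List String) : Option String :=
  match pvPriority.find? (fun lang => available.contains lang) with
  | some lang => some lang
  | none =>
    match available.find? (fun lang => PySem.Str.startswith lang "zh") with
    | some lang => some lang
    | none => match available with | [] => none | x :: _ => some x  -- available[0] if available else None

-- ===== PORT B =====
-- rank = {lang: i for i, lang in enumerate(YOUTUBE_LANG_PRIORITY)}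
def pvRank : PySem.Dict String Int :=
  (PySem.List.enumerate pvPriority).foldl (fun d p => d.insert p.2 p.1) PySem.Dict.empty

-- one iteration of B's loop body over the state (best_rank, first_zh, first)
def pvStepB (acc : Option Int × Option String × Option String) (lang : String) :
    Option Int × Option String × Option String :=
  let bestRank := acc.1
  let firstZh := acc.2.1
  let first := acc.2.2
  let first := if first.isNone then some lang else first
  let bestRank :=
    match pvRank.get? lang with
    | some r => match bestRank with
                | none => some r
                | some b => if r < b then some r else some b
    | none => bestRank
  let firstZh := if firstZh.isNone && PySem.Str.startswith lang "zh" then some lang else firstZh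
  (bestRank, firstZh, first)

def select_lang_py_alt (available : List String) : Option String :=
  match available.foldl pvStepB (none, none, none) with
  | (some i, _, _) => PySem.List.pyGet? pvPriority i  -- YOUTUBE_LANG_PRIORITY[best_rank]; i is always a valid index 0..8
  | (none, some z, _) => some z
  | (none, none, first) => first

-- ===== PRECONDITION & SPEC =====
def Spec_select_lang_py (available : List String) (out : Option String) : Prop := out = select_lang_py_alt available
instance (available : List String) (out : Option String) : Decidable (Spec_select_lang_py available out) := by unfold Spec_select_lang_py; infer_instance

-- ===== CLAIM (what is proved, stated in full; the proofs are below) =====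
def Claim_equal_select_lang_py : Prop := ∀ (available : List String), Dom_select_lang_py available → Spec_select_lang_py available (select_lang_py available)

-- ===== LEMMAS AND PROOFS =====

-- the three independent components of pvStepB
def pvBrStep (a : Option Int) (lang : String) : Option Int :=
  match pvRank.get? lang with
  | some r => match a with | none => some r | some b => if r < b then some r else some b
  | none => a

def pvZhStep (b : Option String) (lang : String) : Option String :=
  if b.isNone && PySem.Str.startswith lang "zh" then some lang else b

def pvFStep (c : Option String) (lang : String) : Option String :=
  if c.isNone then some lang else c

theorem pvStepB_split (acc : Option Int × Option String × Option String) (lang : String) :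
    pvStepB acc lang = (pvBrStep acc.1 lang, pvZhStep acc.2.1 lang, pvFStep acc.2.2 lang) := rfl

theorem pvFold_split (av : List String) :
    ∀ (a : Option Int) (b c : Option String),
    av.foldl pvStepB (a, b, c) = (av.foldl pvBrStep a, av.foldl pvZhStep b, av.foldl pvFStep c) := by
  induction av with
  | nil => intro a b c; rfl
  | cons x xs ih =>
      intro a b c
      simp only [List.foldl_cons, pvStepB_split]
      exact ih _ _ _

theorem pvFFold_some (av : List String) (x : String) : av.foldl pvFStep (some x) = some x := by
  induction av with
  | nil => rfl
  | cons y ys ih => simpa [pvFStep] using ih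

theorem pvFFold_none (av : List String) : av.foldl pvFStep none = av.head? := by
  cases av with
  | nil => rfl
  | cons x xs => simp [pvFStep, pvFFold_some]

theorem pvZhFold_some (av : List String) (x : String) : av.foldl pvZhStep (some x) = some x := by
  induction av with
  | nil => rfl
  | cons y ys ih => simpa [pvZhStep] using ih

theorem pvZhFold_none (av : List String) :
    av.foldl pvZhStep none = av.find? (fun l => PySem.Str.startswith l "zh") := by
  induction av with
  | nil => rfl
  | cons x xs ih =>
      by_cases h : PySem.Chars.startswith x.toList ['z', 'h'] = true
      · simp [pvZhStep, h, pvZhFold_some]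
      · simp only [Bool.not_eq_true] at h
        simp [pvZhStep, h, ih]

theorem pvBrStep_none_iff (a : Option Int) (l : String) :
    pvBrStep a l = none ↔ (a = none ∧ pvRank.get? l = none) := by
  unfold pvBrStep
  cases hr : pvRank.get? l with
  | none => cases a <;> simp
  | some r => cases a with
      | none => simp
      | some b =>
          constructor
          · intro hh; exfalso; by_cases hlt : r < b <;> simp [hlt] at hh
          · rintro ⟨hh, _⟩; exact absurd hh (by simp)

theorem pvBrFold_none (av : List String) :
    ∀ a, av.foldl pvBrStep a = none ↔ (a = none ∧ ∀ l ∈ av, pvRank.get? l = none) := by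
  induction av with
  | nil => intro a; simp
  | cons x xs ih =>
      intro a
      simp only [List.foldl_cons, ih, pvBrStep_none_iff]
      constructor
      · rintro ⟨⟨rfl, hx⟩, h2⟩
        refine ⟨rfl, ?_⟩
        intro l hl
        rcases List.mem_cons.mp hl with rfl | hl
        · exact hx
        · exact h2 l hl
      · rintro ⟨rfl, h2⟩
        exact ⟨⟨rfl, h2 x (by simp)⟩, fun l hl => h2 l (by simp [hl])⟩

theorem pvBrStep_some (a : Option Int) (l : String) (i : Int) (h : pvBrStep a l = some i) :
    (a = some i ∨ pvRank.get? l = some i) ∧ (∀ j, a = some j → i ≤ j) ∧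
    (∀ j, pvRank.get? l = some j → i ≤ j) := by
  unfold pvBrStep at h
  rcases Option.eq_none_or_eq_some (pvRank.get? l) with hr | ⟨r, hr⟩ <;> rw [hr] at h
  · replace h : a = some i := h
    exact ⟨Or.inl h, fun j hj => by rw [h] at hj; simp at hj; omega,
           fun j hj => by rw [hr] at hj; simp at hj⟩
  · rcases Option.eq_none_or_eq_some a with ha | ⟨b, ha⟩ <;> rw [ha] at h
    · replace h : some r = some i := h
      simp only [Option.some.injEq] at h; subst h
      exact ⟨Or.inr hr, fun j hj => by rw [ha] at hj; simp at hj,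
             fun j hj => by rw [hr] at hj; simp at hj; omega⟩
    · replace h : (if r < b then some r else some b) = some i := h
      by_cases hlt : r < b
      · rw [if_pos hlt] at h
        simp only [Option.some.injEq] at h; subst h
        exact ⟨Or.inr hr, fun j hj => by rw [ha] at hj; simp at hj; omega,
               fun j hj => by rw [hr] at hj; simp at hj; omega⟩
      · rw [if_neg hlt] at h
        simp only [Option.some.injEq] at h; subst h
        exact ⟨Or.inl ha, fun j hj => by rw [ha] at hj; simp at hj; omega,
               fun j hj => by rw [hr] at hj; simp at hj; omega⟩

theorem pvBrFold_some (av : List String) :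
    ∀ (a : Option Int) (i : Int), av.foldl pvBrStep a = some i →
    (a = some i ∨ ∃ l ∈ av, pvRank.get? l = some i) ∧ (∀ j, a = some j → i ≤ j) ∧
    (∀ l ∈ av, ∀ j, pvRank.get? l = some j → i ≤ j) := by
  induction av with
  | nil =>
      intro a i h; simp at h
      exact ⟨Or.inl (by simp [h]), fun j hj => by rw [h] at hj; simp at hj; omega, by simp⟩
  | cons x xs ih =>
      intro a i h
      simp only [List.foldl_cons] at h
      obtain ⟨hmem, hlow, hlist⟩ := ih _ _ h
      refine ⟨?_, ?_, ?_⟩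
      · rcases hmem with hstep | ⟨l, hl, hrl⟩
        · rcases (pvBrStep_some a x i hstep).1 with ha | hx
          · exact Or.inl ha
          · exact Or.inr ⟨x, by simp, hx⟩
        · exact Or.inr ⟨l, by simp [hl], hrl⟩
      · intro j hj
        subst hj
        cases hs : pvBrStep (some j) x with
        | none => exact absurd ((pvBrStep_none_iff _ _).mp hs).1 (by simp)
        | some k =>
            have h1 := (pvBrStep_some (some j) x k hs).2.1 j rfl
            have h2 := hlow k hs
            omega
      · intro l hl j hj
        rcases List.mem_cons.mp hl with rfl | hl'
        · cases hs : pvBrStep a l with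
          | none => exact absurd ((pvBrStep_none_iff _ _).mp hs).2 (by simp [hj])
          | some k =>
              have h1 := (pvBrStep_some a l k hs).2.2 j hj
              have h2 := hlow k hs
              omega
        · exact hlist l hl' j hj

theorem pvRank_lit : pvRank = PySem.Dict.mk [("zh-Hans-en",0),("zh-Hant-en",1),("zh-Hans",2),("zh-Hant",3),("zh-CN",4),("zh-TW",5),("zh-HK",6),("zh",7),("en",8)] := by decide

theorem pvRank_fwd : ∀ j : Fin 9, pvRank.get? (pvPriority.getD j "") = some ((j : Nat) : Int) := by decide

theorem pvPyGet_lit : ∀ j : Fin 9, PySem.List.pyGet? pvPriority ((j : Nat) : Int) = some (pvPriority.getD j "") := by decide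

theorem pvRank_bwd (l : String) (i : Int) (h : pvRank.get? l = some i) :
    ∃ j : Fin 9, i = ((j : Nat) : Int) ∧ l = pvPriority.getD j "" := by
  rw [pvRank_lit] at h
  simp only [PySem.Dict.get?_mk_cons] at h
  split_ifs at h with h0 h1 h2 h3 h4 h5 h6 h7 h8
  · simp only [beq_iff_eq] at h0; simp only [Option.some.injEq] at h
    exact ⟨⟨0, by omega⟩, by simp only [Fin.val_mk]; omega, h0.symm⟩
  · simp only [beq_iff_eq] at h1; simp only [Option.some.injEq] at h
    exact ⟨⟨1, by omega⟩, by simp only [Fin.val_mk]; omega, h1.symm⟩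
  · simp only [beq_iff_eq] at h2; simp only [Option.some.injEq] at h
    exact ⟨⟨2, by omega⟩, by simp only [Fin.val_mk]; omega, h2.symm⟩
  · simp only [beq_iff_eq] at h3; simp only [Option.some.injEq] at h
    exact ⟨⟨3, by omega⟩, by simp only [Fin.val_mk]; omega, h3.symm⟩
  · simp only [beq_iff_eq] at h4; simp only [Option.some.injEq] at h
    exact ⟨⟨4, by omega⟩, by simp only [Fin.val_mk]; omega, h4.symm⟩
  · simp only [beq_iff_eq] at h5; simp only [Option.some.injEq] at h
    exact ⟨⟨5, by omega⟩, by simp only [Fin.val_mk]; omega, h5.symm⟩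
  · simp only [beq_iff_eq] at h6; simp only [Option.some.injEq] at h
    exact ⟨⟨6, by omega⟩, by simp only [Fin.val_mk]; omega, h6.symm⟩
  · simp only [beq_iff_eq] at h7; simp only [Option.some.injEq] at h
    exact ⟨⟨7, by omega⟩, by simp only [Fin.val_mk]; omega, h7.symm⟩
  · simp only [beq_iff_eq] at h8; simp only [Option.some.injEq] at h
    exact ⟨⟨8, by omega⟩, by simp only [Fin.val_mk]; omega, h8.symm⟩
  · rw [PySem.Dict.get?] at h; simp at h

-- generic: find? returns the element at the first index where the predicate holds
theorem pvFind?_at (p : String → Bool) :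
    ∀ (P : List String) (i : Nat), i < P.length →
    (∀ j, j < i → p (P.getD j "") = false) → p (P.getD i "") = true →
    P.find? p = some (P.getD i "") := by
  intro P
  induction P with
  | nil => intro i h; simp at h
  | cons x xs ih =>
      intro i hi hlow hp
      cases i with
      | zero =>
          have hx : p x = true := by simpa using hp
          simp [hx]
      | succ k =>
          have hx : p x = false := hlow 0 (Nat.succ_pos k)
          simp only [List.getD_cons_succ] at hp ⊢
          rw [List.find?_cons]
          simp only [hx]
          exact ih k (by simpa using hi) (fun j hj => by simpa using hlow (j+1) (by omega)) hp

-- ===== VERDICT (by name: the statement is the Claim_ definition above) =====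
theorem select_lang_py_spec : Claim_equal_select_lang_py := by
  unfold Claim_equal_select_lang_py
  intro av _
  unfold Spec_select_lang_py select_lang_py select_lang_py_alt
  rw [pvFold_split, pvZhFold_none, pvFFold_none]
  cases hbr : av.foldl pvBrStep none with
  | none =>
      have hall : ∀ l ∈ av, pvRank.get? l = none := ((pvBrFold_none av none).mp hbr).2
      have hfind : pvPriority.find? (fun lang => av.contains lang) = none := by
        rw [List.find?_eq_none]
        intro p hp hc
        have hpav : p ∈ av := by simp at hc; exact hc
        have hn := hall p hpav
        simp only [pvPriority, List.mem_cons, List.not_mem_nil, or_false] at hp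
        rcases hp with rfl | rfl | rfl | rfl | rfl | rfl | rfl | rfl | rfl <;>
          exact absurd hn (by decide)
      rw [hfind]
      cases hz : av.find? (fun l => PySem.Str.startswith l "zh") with
      | some z => rfl
      | none => cases av <;> rfl
  | some i =>
      obtain ⟨hmem, _, hlow⟩ := pvBrFold_some av none i hbr
      rcases hmem with hcontra | ⟨l, hl, hrl⟩
      · simp at hcontra
      obtain ⟨j, rfl, rfl⟩ := pvRank_bwd l _ hrl
      have hfind : pvPriority.find? (fun lang => av.contains lang)
          = some (pvPriority.getD (j : Nat) "") := by
        refine pvFind?_at _ pvPriority (j : Nat) (by simpa [pvPriority] using j.2) ?_ ?_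
        · intro j' hj'
          by_cases hm : pvPriority.getD j' "" ∈ av
          · have hj9 : j' < 9 := by have := j.2; omega
            have := hlow _ hm _ (pvRank_fwd ⟨j', hj9⟩)
            simp at this; omega
          · simpa using hm
        · simpa using hl
      rw [hfind]
      show some (pvPriority.getD (j : Nat) "") = PySem.List.pyGet? pvPriority ((j : Nat) : Int)
      rw [pvPyGet_lit j]
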